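-- pv_equiv track=rewrite | github.com/notashwinii/CRISPRnase | backend/src/core/guide_designer.py | _check_hairpin
-- ===== SOURCE A (Python) =====
-- def _check_hairpin(sequence: str) -> bool:
--     """Check for potential hairpin formation"""
--     # Simplified check - look for reverse complementary sequences
--     complement = {'A': 'T', 'T': 'A', 'G': 'C', 'C': 'G'}
--     rev_comp = ''.join(complement.get(base, base)
--                        for base in reversed(sequence))
--
--     for i in range(len(sequence)-3):
--         for j in range(i+3, len(sequence)):
--             if sequence[i:i+4] in rev_comp[j-3:j+1]:
--                 return True
--     return False
-- ===== SOURCE B (Python) =====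
-- def _check_hairpin(sequence: str) -> bool:
--     """Check for potential hairpin formation (single pass with a rolling set of seen rev-comp 4-mers)."""
--     complement = {'A': 'T', 'T': 'A', 'G': 'C', 'C': 'G'}
--     rev_comp = ''.join(complement.get(base, base)
--                        for base in reversed(sequence))
--     seen = set()
--     for i in range(len(sequence) - 4, -1, -1):
--         seen.add(rev_comp[i:i+4])
--         if sequence[i:i+4] in seen:
--             return True
--     return False
-- ===== Notes on version B (the rewrite author's own statement) =====
-- stated objective: alternative
-- what changed: Replaced the nested i/j window comparison with a single descending pass that maintains a set of already-seen reverse-complement 4-mers and tests each sequence 4-mer by set membership; on typical inputs both exit early at the first match, so measured cost is similar.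
import Mathlib
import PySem

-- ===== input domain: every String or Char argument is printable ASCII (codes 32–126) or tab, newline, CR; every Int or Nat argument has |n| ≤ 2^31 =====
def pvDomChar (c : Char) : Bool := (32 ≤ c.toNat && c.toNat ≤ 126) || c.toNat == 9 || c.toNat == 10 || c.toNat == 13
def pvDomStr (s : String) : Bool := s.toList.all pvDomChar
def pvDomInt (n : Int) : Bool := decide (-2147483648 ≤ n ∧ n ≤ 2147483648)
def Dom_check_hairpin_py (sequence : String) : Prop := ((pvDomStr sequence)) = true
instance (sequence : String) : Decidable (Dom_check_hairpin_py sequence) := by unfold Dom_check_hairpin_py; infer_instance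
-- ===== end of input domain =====

-- B replaces A's nested window scan by a single descending pass that keeps the already-seen
-- reverse-complement 4-mers in a set (objective: alternative algorithm); same return value everywhere.

-- ===== PORT A =====
-- complement.get(base, base) from the Python dict literal
def pyComplementChar (c : Char) : Char :=
  if c = 'A' then 'T' else if c = 'T' then 'A' else if c = 'G' then 'C'
  else if c = 'C' then 'G' else c

-- rev_comp = ''.join(complement.get(base, base) for base in reversed(sequence))
def pyRevComp (cs : List Char) : List Char := cs.reverse.map pyComplementChar

-- literal port of A: two nested ranges with early return (= any), substring test 'in'
def check_hairpin_py (sequence : String) : Bool :=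
  let cs := sequence.toList
  let rc := pyRevComp cs
  let n : Int := cs.length
  (PySem.List.pyRange 0 (n - 3)).any fun i =>
    (PySem.List.pyRange (i + 3) n).any fun j =>
      PySem.Chars.isIn (PySem.List.slice cs (some i) (some (i + 4)))
                       (PySem.List.slice rc (some (j - 3)) (some (j + 1)))

-- ===== PORT B =====
-- the descending loop of Source B: add rev_comp[i:i+4] to the set, then test sequence[i:i+4] membership
def hairpinScan (cs rc : List Char) : List Int → PySem.Set (List Char) → Bool
  | [], _ => false
  | i :: rest, seen =>
    let seen' := seen.add (PySem.List.slice rc (some i) (some (i + 4)))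
    if PySem.List.slice cs (some i) (some (i + 4)) ∈ seen' then true
    else hairpinScan cs rc rest seen'

def check_hairpin_py_alt (sequence : String) : Bool :=
  let cs := sequence.toList
  let rc := pyRevComp cs
  let n : Int := cs.length
  hairpinScan cs rc (PySem.List.pyRange (n - 4) (-1) (-1)) (PySem.Set.ofList [])

-- ===== PRECONDITION & SPEC =====
def Spec_check_hairpin_py (sequence : String) (out : Bool) : Prop := out = check_hairpin_py_alt sequence
instance (sequence : String) (out : Bool) : Decidable (Spec_check_hairpin_py sequence out) := by unfold Spec_check_hairpin_py; infer_instance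

-- ===== CLAIM (what is proved, stated in full; the proofs are below) =====
def Claim_equal_check_hairpin_py : Prop := ∀ (sequence : String), Dom_check_hairpin_py sequence → Spec_check_hairpin_py sequence (check_hairpin_py sequence)

-- ===== LEMMAS AND PROOFS =====

-- the 4-mer window of xs starting at (Nat) index i
def W (xs : List Char) (i : Nat) : List Char := List.take 4 (List.drop i xs)

-- both programs' common characterisation: some sequence 4-mer at i equals a rev_comp 4-mer at j ≥ i
def HP (cs rc : List Char) : Prop :=
  ∃ a b : Nat, a ≤ b ∧ b + 4 ≤ cs.length ∧ W cs a = W rc b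

lemma slice_window (xs : List Char) (i : Nat) :
    PySem.List.slice xs (some (i : Int)) (some ((i : Int) + 4)) = W xs i := by
  have h := PySem.List.slice_natCast xs i (i + 4)
  have h2 : ((i + 4 : Nat) : Int) = (i : Int) + 4 := by push_cast; ring
  rw [h2] at h
  simp [h, W]

lemma length_pyRevComp (cs : List Char) : (pyRevComp cs).length = cs.length := by
  simp [pyRevComp]

lemma length_W (xs : List Char) (i : Nat) (h : i + 4 ≤ xs.length) : (W xs i).length = 4 := by
  simp [W]
  omega

lemma scan_iff (cs rc : List Char) (k : Nat) : ∀ seen : PySem.Set (List Char),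
    (hairpinScan cs rc (PySem.List.pyRange ((k : Int) - 1) (-1) (-1)) seen = true) ↔
    (∃ i : Nat, i < k ∧ (W cs i ∈ seen ∨ ∃ j : Nat, i ≤ j ∧ j < k ∧ W cs i = W rc j)) := by
  induction k with
  | zero =>
    intro seen
    rw [PySem.List.pyRange_neg_one_eq_nil (by omega)]
    simp [hairpinScan]
  | succ k ih =>
    intro seen
    have h1 : ((k + 1 : Nat) : Int) - 1 = (k : Int) := by push_cast; ring
    rw [h1, PySem.List.pyRange_neg_one_cons (by omega), hairpinScan, slice_window rc k,
        slice_window cs k]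
    by_cases hmem : W cs k ∈ seen.add (W rc k)
    · simp only [hmem, if_true, true_iff]
      rcases (PySem.Set.mem_add seen (W rc k) (W cs k)).mp hmem with hs | he
      · exact ⟨k, by omega, Or.inl hs⟩
      · exact ⟨k, by omega, Or.inr ⟨k, le_rfl, by omega, he⟩⟩
    · simp only [hmem, if_false, ih (seen.add (W rc k))]
      constructor
      · rintro ⟨i, hik, hs | ⟨j, hij, hjk, he⟩⟩
        · rcases (PySem.Set.mem_add seen (W rc k) (W cs i)).mp hs with hs' | he'
          · exact ⟨i, by omega, Or.inl hs'⟩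
          · exact ⟨i, by omega, Or.inr ⟨k, by omega, by omega, he'⟩⟩
        · exact ⟨i, by omega, Or.inr ⟨j, hij, by omega, he⟩⟩
      · rintro ⟨i, hik, hs | ⟨j, hij, hjk, he⟩⟩
        · have hik' : i < k := by
            rcases Nat.lt_or_ge i k with h | h
            · exact h
            · exfalso
              have : i = k := by omega
              subst this
              exact hmem ((PySem.Set.mem_add seen (W rc i) (W cs i)).mpr (Or.inl hs))
          exact ⟨i, hik', Or.inl ((PySem.Set.mem_add seen (W rc k) (W cs i)).mpr (Or.inl hs))⟩
        · rcases Nat.lt_or_ge j k with hjk' | hjk'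
          · exact ⟨i, by omega, Or.inr ⟨j, hij, hjk', he⟩⟩
          · have hj : j = k := by omega
            subst hj
            have hik' : i < j := by
              rcases Nat.lt_or_ge i j with h | h
              · exact h
              · exfalso
                have : i = j := by omega
                subst this
                exact hmem ((PySem.Set.mem_add seen (W rc i) (W cs i)).mpr (Or.inr he))
            exact ⟨i, hik', Or.inl ((PySem.Set.mem_add seen (W rc j) (W cs i)).mpr (Or.inr he))⟩

lemma alt_iff (s : String) :
    check_hairpin_py_alt s = true ↔ HP s.toList (pyRevComp s.toList) := by
  set cs := s.toList with hcs
  show hairpinScan cs (pyRevComp cs) (PySem.List.pyRange ((cs.length : Int) - 4) (-1) (-1))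
      (PySem.Set.ofList []) = true ↔ HP cs (pyRevComp cs)
  by_cases h4 : 4 ≤ cs.length
  · have hrw : (cs.length : Int) - 4 = ((cs.length - 3 : Nat) : Int) - 1 := by
      rw [Nat.cast_sub (by omega)]; push_cast; ring
    rw [hrw, scan_iff]
    simp only [PySem.Set.mem_ofList, List.not_mem_nil, false_or]
    constructor
    · rintro ⟨i, hik, j, hij, hjk, he⟩
      exact ⟨i, j, hij, by omega, he⟩
    · rintro ⟨a, b, hab, hb4, he⟩
      exact ⟨a, by omega, b, hab, by omega, he⟩
  · rw [PySem.List.pyRange_neg_one_eq_nil (by omega)]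
    simp only [hairpinScan, Bool.false_eq_true, false_iff]
    rintro ⟨a, b, hab, hb4, he⟩
    omega

lemma a_iff (s : String) :
    check_hairpin_py s = true ↔ HP s.toList (pyRevComp s.toList) := by
  set cs := s.toList with hcs
  set rc := pyRevComp cs with hrc
  show ((PySem.List.pyRange 0 ((cs.length : Int) - 3)).any fun i =>
      (PySem.List.pyRange (i + 3) (cs.length : Int)).any fun j =>
        PySem.Chars.isIn (PySem.List.slice cs (some i) (some (i + 4)))
          (PySem.List.slice rc (some (j - 3)) (some (j + 1)))) = true ↔ HP cs rc
  simp only [List.any_eq_true, PySem.List.mem_pyRange_one]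
  constructor
  · rintro ⟨i, ⟨h0, h1⟩, j, ⟨h2, h3⟩, hin⟩
    set a := i.toNat with ha
    set b := (j - 3).toNat with hb
    have hia : i = (a : Int) := by omega
    have hjb : j - 3 = (b : Int) := by omega
    have hjb1 : j + 1 = (b : Int) + 4 := by omega
    rw [hia, slice_window cs a, hjb, hjb1, slice_window rc b] at hin
    have hinf := (PySem.Chars.isIn_iff_infix _ _).mp hin
    have ha4 : a + 4 ≤ cs.length := by omega
    have hb4 : b + 4 ≤ cs.length := by omega
    have hb4' : b + 4 ≤ rc.length := by rw [hrc, length_pyRevComp]; exact hb4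
    have hlen : (W cs a).length = (W rc b).length := by
      rw [length_W cs a ha4, length_W rc b hb4']
    exact ⟨a, b, by omega, hb4, hinf.sublist.eq_of_length hlen⟩
  · rintro ⟨a, b, hab, hb4, he⟩
    refine ⟨(a : Int), ⟨by omega, by omega⟩, (b : Int) + 3, ⟨by omega, by omega⟩, ?_⟩
    have h1 : (b : Int) + 3 - 3 = (b : Int) := by ring
    have h2 : (b : Int) + 3 + 1 = (b : Int) + 4 := by ring
    rw [h1, h2, slice_window cs a, slice_window rc b, he]
    exact (PySem.Chars.isIn_iff_infix _ _).mpr (List.infix_refl _)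

-- ===== VERDICT (by name: the statement is the Claim_ definition above) =====
theorem check_hairpin_py_spec : Claim_equal_check_hairpin_py := by
  intro s _
  unfold Spec_check_hairpin_py
  have h := (a_iff s).trans (alt_iff s).symm
  cases hA : check_hairpin_py s
  · cases hB : check_hairpin_py_alt s
    · rfl
    · rw [hA] at h; rw [hB] at h; simp at h
  · rw [hA] at h; exact (h.mp rfl).symm
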